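-- pv_equiv track=rewrite | github.com/empty-block/vibe-playlist | data/pipelines/metadata_extractor/lib/metadata_extractor.py | extract_aux_metadata
-- ===== SOURCE A (Python) =====
-- from typing import Dict, List, Optional, Any
--
-- def extract_aux_metadata(metadata: Dict) -> str:
--     """Extract key AUX metadata into clean format"""
--     try:
--         # Get title from Open Graph and clean it
--         title = None
--         if 'opengraph' in metadata:
--             for og_section in metadata['opengraph']:
--                 for prop in og_section.get('properties', []):
--                     if prop[0] == 'og:title':
--                         raw_title = prop[1]
--                         # Remove " - AUX" suffix
--                         if raw_title.endswith(' - AUX'):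
--                             title = raw_title.replace(' - AUX', '')
--                         else:
--                             title = raw_title
--                         break
--
--         # Get description from Open Graph
--         description = None
--         if 'opengraph' in metadata:
--             for og_section in metadata['opengraph']:
--                 for prop in og_section.get('properties', []):
--                     if prop[0] == 'og:description':
--                         desc = prop[1]
--                         # Skip generic AUX description
--                         if desc and desc != "The AUX for the internet":
--                             description = desc
--                         break
--
--         # Get image
--         image = None
--         if 'opengraph' in metadata:
--             for og_section in metadata['opengraph']:
--                 for prop in og_section.get('properties', []):
--                     if prop[0] == 'og:image':
--                         image = prop[1]
--                         break
--
--         # Build formatted string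
--         parts = []
--         if title:
--             parts.append(f"title - {title}")
--         if description:
--             parts.append(f"description - {description}")
--         if image:
--             parts.append(f"image - {image}")
--
--         return " | ".join(parts) if parts else "aux - metadata extracted"
--
--     except Exception as e:
--         return f"aux - extraction error: {str(e)}"
-- ===== SOURCE B (Python) =====
-- def extract_aux_metadata(metadata):
--     """Extract key AUX metadata into clean format (single pass over the sections)."""
--     try:
--         title = description = image = None
--         for section in metadata.get('opengraph', []):
--             t = d = im = None
--             for prop in section.get('properties', []):
--                 key = prop[0]
--                 if key == 'og:title' and t is None:
--                     t = prop[1]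
--                 elif key == 'og:description' and d is None:
--                     d = prop[1]
--                 elif key == 'og:image' and im is None:
--                     im = prop[1]
--             if t is not None:
--                 title = t.replace(' - AUX', '') if t.endswith(' - AUX') else t
--             if d and d != "The AUX for the internet":
--                 description = d
--             if im is not None:
--                 image = im
--         parts = []
--         if title:
--             parts.append(f"title - {title}")
--         if description:
--             parts.append(f"description - {description}")
--         if image:
--             parts.append(f"image - {image}")
--         return " | ".join(parts) if parts else "aux - metadata extracted"
--     except Exception as e:
--         return f"aux - extraction error: {str(e)}"
-- ===== Notes on version B (the rewrite author's own statement) =====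
-- stated objective: alternative
-- what changed: B replaces A's three separate passes over the opengraph sections (one per og: key) with a single pass that records the first per-section occurrence of all three keys at once; Pre_ excludes inputs containing an empty property entry, where whether A returns its error string or a normal value depends on which of its three passes first reaches the empty entry (a scan-order artefact on malformed data).
import Mathlib
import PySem

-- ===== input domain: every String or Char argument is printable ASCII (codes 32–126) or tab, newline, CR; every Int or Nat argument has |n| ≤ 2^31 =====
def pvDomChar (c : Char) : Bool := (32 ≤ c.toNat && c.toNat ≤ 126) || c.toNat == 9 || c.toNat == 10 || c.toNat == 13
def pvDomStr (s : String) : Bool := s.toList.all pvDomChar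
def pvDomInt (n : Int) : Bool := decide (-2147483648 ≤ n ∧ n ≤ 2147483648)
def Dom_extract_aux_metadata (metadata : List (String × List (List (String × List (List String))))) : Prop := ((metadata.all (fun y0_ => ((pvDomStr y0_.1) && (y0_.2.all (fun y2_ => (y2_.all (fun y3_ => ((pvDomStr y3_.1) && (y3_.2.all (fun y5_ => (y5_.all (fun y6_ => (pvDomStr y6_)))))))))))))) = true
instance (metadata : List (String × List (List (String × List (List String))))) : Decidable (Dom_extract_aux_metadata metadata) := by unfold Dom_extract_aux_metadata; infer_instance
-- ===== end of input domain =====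

-- B replaces A's three try/except-wrapped passes (one per og: key) by a single pass that
-- records the first per-section occurrence of all three keys at once; same return value.

-- ===== PORT A =====
-- one inner `for prop in og_section.get('properties', [])` loop with its break;
-- `.error ()` marks the IndexError raised by prop[0] / prop[1] (caught by A's except)
def pvScanSection (k : String) : List (List String) → Except Unit (Option String)
  | [] => .ok none
  | p :: rest =>
    match PySem.List.pyGet? p 0 with
    | none => .error ()
    | some h =>
      if h = k then
        match PySem.List.pyGet? p 1 with
        | none => .error ()
        | some v => .ok (some v)
      else pvScanSection k rest

-- title update: raw_title with the " - AUX" suffix rule (replace removes ALL occurrences)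
def pvUpdTitle : Option String → String → Option String := fun _ v =>
  some (if PySem.Str.endswith v " - AUX" then PySem.Str.replace v " - AUX" "" else v)
-- description update: skip falsy / generic values (previous value kept)
def pvUpdDesc : Option String → String → Option String := fun acc v =>
  if v ≠ "" ∧ v ≠ "The AUX for the internet" then some v else acc
def pvUpdImage : Option String → String → Option String := fun _ v => some v

-- one outer `for og_section in metadata['opengraph']` loop of a pass
def pvPass (k : String) (f : Option String → String → Option String) :
    List (List (String × List (List String))) → Option String → Except Unit (Option String)
  | [], acc => .ok acc
  | s :: rest, acc =>
    match pvScanSection k ((PySem.Dict.mk s).getD "properties" []) with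
    | .error _ => .error ()
    | .ok none => pvPass k f rest acc
    | .ok (some v) => pvPass k f rest (f acc v)

-- the final parts / join lines (identical source lines in A and B)
def pvRenderA (title description image : Option String) : String :=
  let parts : List String :=
    (match title with | some t => if t ≠ "" then ["title - " ++ t] else [] | none => []) ++
    (match description with | some d => if d ≠ "" then ["description - " ++ d] else [] | none => []) ++
    (match image with | some i => if i ≠ "" then ["image - " ++ i] else [] | none => [])
  match parts with
  | [] => "aux - metadata extracted"
  | _ => PySem.Str.join " | " parts

def extract_aux_metadata (metadata : List (String × List (List (String × List (List String))))) : String :=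
  let secs := match (PySem.Dict.mk metadata).get? "opengraph" with | some s => s | none => []
  let r : Except Unit (Option String × Option String × Option String) := do
    let title ← pvPass "og:title" pvUpdTitle secs none
    let description ← pvPass "og:description" pvUpdDesc secs none
    let image ← pvPass "og:image" pvUpdImage secs none
    pure (title, description, image)
  match r with
  -- on the admitted inputs the only possible exception is IndexError from prop[0]/prop[1],
  -- whose str() is exactly this message
  | .error _ => "aux - extraction error: list index out of range"
  | .ok (title, description, image) => pvRenderA title description image

-- ===== PORT B =====
-- single scan of one section's properties, tracking the first hit of each key;
-- `.error ()` = the IndexError of B's prop[0]/prop[1] (caught by B's try/except)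
def altScanProps : List (List String) → Option String → Option String → Option String →
    Except Unit (Option String × Option String × Option String)
  | [], t, d, im => .ok (t, d, im)
  | p :: rest, t, d, im =>
    match p with
    | [] => .error ()
    | head :: tl =>
      if head = "og:title" ∧ t = none then
        match tl with | [] => .error () | v :: _ => altScanProps rest (some v) d im
      else if head = "og:description" ∧ d = none then
        match tl with | [] => .error () | v :: _ => altScanProps rest t (some v) im
      else if head = "og:image" ∧ im = none then
        match tl with | [] => .error () | v :: _ => altScanProps rest t d (some v)
      else altScanProps rest t d im

-- single `for section in metadata.get('opengraph', [])` loop, folding the running values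
def altLoop : List (List (String × List (List String))) → Option String → Option String →
    Option String → Except Unit (Option String × Option String × Option String)
  | [], title, description, image => .ok (title, description, image)
  | s :: rest, title, description, image =>
    match altScanProps ((PySem.Dict.mk s).getD "properties" []) none none none with
    | .error _ => .error ()
    | .ok (t, d, im) =>
      let title := match t with
        | some v => some (if PySem.Str.endswith v " - AUX" then PySem.Str.replace v " - AUX" "" else v)
        | none => title
      let description := match d with
        | some v => if v ≠ "" ∧ v ≠ "The AUX for the internet" then some v else description
        | none => description
      let image := match im with | some v => some v | none => image
      altLoop rest title description image

-- the final parts / join lines (identical source lines in A and B)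
def pvRenderB (title description image : Option String) : String :=
  let parts : List String :=
    (match title with | some t => if t ≠ "" then ["title - " ++ t] else [] | none => []) ++
    (match description with | some d => if d ≠ "" then ["description - " ++ d] else [] | none => []) ++
    (match image with | some i => if i ≠ "" then ["image - " ++ i] else [] | none => [])
  match parts with
  | [] => "aux - metadata extracted"
  | _ => PySem.Str.join " | " parts

def extract_aux_metadata_alt (metadata : List (String × List (List (String × List (List String))))) : String :=
  match altLoop ((PySem.Dict.mk metadata).getD "opengraph" []) none none none with
  -- the only possible exception on the admitted inputs is IndexError, str() = this message
  | .error _ => "aux - extraction error: list index out of range"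
  | .ok (title, description, image) => pvRenderB title description image

-- ===== PRECONDITION & SPEC =====
-- Pre_ excludes inputs whose opengraph sections contain an EMPTY property entry: there,
-- whether A returns its error string or silently a normal value depends on which of its
-- three passes first reaches the empty entry (B's single scan always reaches it), a
-- scan-order artefact on malformed data where either outcome is defensible.
def Pre_extract_aux_metadata (metadata : List (String × List (List (String × List (List String))))) : Prop :=
  ∀ s ∈ (PySem.Dict.mk metadata).getD "opengraph" [],
    ([] : List String) ∉ (PySem.Dict.mk s).getD "properties" []
instance (metadata : List (String × List (List (String × List (List String))))) : Decidable (Pre_extract_aux_metadata metadata) := by unfold Pre_extract_aux_metadata; infer_instance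

def pvWitness_extract_aux_metadata : (List (String × List (List (String × List (List String))))) :=
  [("opengraph", [[("properties", [["og:title", "Song - AUX"], ["og:image", "img"]])]])]

def Spec_extract_aux_metadata (metadata : List (String × List (List (String × List (List String))))) (out : String) : Prop := out = extract_aux_metadata_alt metadata
instance (metadata : List (String × List (List (String × List (List String))))) (out : String) : Decidable (Spec_extract_aux_metadata metadata out) := by unfold Spec_extract_aux_metadata; infer_instance

-- ===== CLAIM (what is proved, stated in full; the proofs are below) =====
def Claim_equal_extract_aux_metadata : Prop := ∀ (metadata : List (String × List (List (String × List (List String))))), Dom_extract_aux_metadata metadata → Pre_extract_aux_metadata metadata → Spec_extract_aux_metadata metadata (extract_aux_metadata metadata)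

-- ===== LEMMAS AND PROOFS =====

-- `pvUpd acc r`: what A's pass for one key yields on a section if the key already broke (`some`) or not
def pvUpd (acc : Option String) (r : Except Unit (Option String)) : Except Unit (Option String) :=
  match acc with | some v => .ok (some v) | none => r

theorem pvScanSection_cons (k : String) (p : List String) (rest : List (List String)) :
    pvScanSection k (p :: rest) =
      (match p with
       | [] => .error ()
       | h :: tl =>
         if h = k then (match tl with | [] => Except.error () | v :: _ => Except.ok (some v))
         else pvScanSection k rest) := by
  cases p with
  | nil => rfl
  | cons h tl =>
    cases tl with
    | nil =>
      by_cases hk : h = k <;> simp [pvScanSection, PySem.List.pyGet?, PySem.List.pyIdx?, hk]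
    | cons v tl' =>
      have h1 : ((1:Int) < (tl'.length:Int) + 1 + 1) := by
        have : (0:Int) ≤ (tl'.length:Int) := by positivity
        omega
      have h2 : ((0:Int) ≤ (tl'.length:Int) + 1) := by positivity
      by_cases hk : h = k <;>
        simp [pvScanSection, PySem.List.pyGet?, PySem.List.pyIdx?, hk, h1, h2]

theorem pvErrBind {α β : Type} (f : α → Except Unit β) :
    ((Except.error () : Except Unit α) >>= f) = Except.error () := rfl

theorem pvBindErr {α β : Type} (x : Except Unit α) :
    (x >>= fun _ => (Except.error () : Except Unit β)) = Except.error () := by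
  cases x with
  | error e => cases e; rfl
  | ok _ => rfl

theorem pvOkBind {α β ε : Type} (a : α) (f : α → Except ε β) :
    ((Except.ok a : Except ε α) >>= f) = f a := rfl

theorem altScanProps_eq (props : List (List String)) (hne : ([] : List String) ∉ props) :
    ∀ (t d im : Option String),
    altScanProps props t d im = (do
      let a ← pvUpd t (pvScanSection "og:title" props)
      let b ← pvUpd d (pvScanSection "og:description" props)
      let c ← pvUpd im (pvScanSection "og:image" props)
      pure (a, b, c)) := by
  induction props with
  | nil =>
    intro t d im
    cases t <;> cases d <;> cases im <;> rfl
  | cons p rest ih =>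
    intro t d im
    have hp : p ≠ [] := fun h => hne (h ▸ List.mem_cons_self ..)
    have hrest : ([] : List String) ∉ rest := fun h => hne (List.mem_cons_of_mem _ h)
    have ih' := ih hrest
    rw [pvScanSection_cons, pvScanSection_cons, pvScanSection_cons]
    cases p with
    | nil => exact absurd rfl hp
    | cons h tl =>
      by_cases ht : h = "og:title"
      · subst ht
        cases t <;> cases tl <;> simp [altScanProps, pvUpd, ih', pvErrBind, pvOkBind]
      · by_cases hd : h = "og:description"
        · subst hd
          cases d <;> cases tl <;> simp [altScanProps, pvUpd, ih', pvErrBind, pvBindErr, pvOkBind]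
        · by_cases hi : h = "og:image"
          · subst hi
            cases im <;> cases tl <;> simp [altScanProps, pvUpd, ih', pvBindErr]
          · simp [altScanProps, pvUpd, ih', ht, hd, hi]

theorem altLoop_eq (secs : List (List (String × List (List String))))
    (hs : ∀ s ∈ secs, ([] : List String) ∉ (PySem.Dict.mk s).getD "properties" []) :
    ∀ (T D I : Option String),
    altLoop secs T D I = (do
      let t ← pvPass "og:title" pvUpdTitle secs T
      let d ← pvPass "og:description" pvUpdDesc secs D
      let im ← pvPass "og:image" pvUpdImage secs I
      pure (t, d, im)) := by
  induction secs with
  | nil => intro T D I; rfl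
  | cons s rest ih =>
    intro T D I
    have ih' := ih (fun x hx => hs x (List.mem_cons_of_mem _ hx))
    have hscan := altScanProps_eq ((PySem.Dict.mk s).getD "properties" [])
      (hs s (List.mem_cons_self ..)) none none none
    simp only [pvUpd] at hscan
    cases hST : pvScanSection "og:title" ((PySem.Dict.mk s).getD "properties" []) with
    | error e =>
      cases e
      simp [altLoop, pvPass, hscan, hST, pvErrBind]
    | ok a =>
      cases hSD : pvScanSection "og:description" ((PySem.Dict.mk s).getD "properties" []) with
      | error e =>
        cases e
        simp [altLoop, pvPass, hscan, hST, hSD, pvErrBind, pvBindErr]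
      | ok b =>
        cases hSI : pvScanSection "og:image" ((PySem.Dict.mk s).getD "properties" []) with
        | error e =>
          cases e
          simp [altLoop, pvPass, hscan, hST, hSD, hSI, pvBindErr]
        | ok c =>
          simp only [altLoop, pvPass, hscan, hST, hSD, hSI, pvOkBind]
          cases a <;> cases b <;> cases c <;>
            simp [ih', pvUpdTitle, pvUpdDesc, pvUpdImage] <;> rfl

theorem render_eq : pvRenderB = pvRenderA := rfl

-- ===== VERDICT (by name: the statement is the Claim_ definition above) =====
theorem extract_aux_metadata_spec : Claim_equal_extract_aux_metadata := by
  intro metadata _ hpre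
  show extract_aux_metadata metadata = extract_aux_metadata_alt metadata
  unfold extract_aux_metadata extract_aux_metadata_alt
  have hsecs : (PySem.Dict.mk metadata).getD "opengraph" [] =
      (match (PySem.Dict.mk metadata).get? "opengraph" with | some s => s | none => []) := by
    simp [PySem.Dict.getD]
    cases (PySem.Dict.mk metadata).get? "opengraph" <;> rfl
  unfold Pre_extract_aux_metadata at hpre
  rw [hsecs] at hpre ⊢
  rw [altLoop_eq _ hpre, render_eq]
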